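-- pv_equiv track=rewrite | github.com/klienkross/AionsHome | aion-chat/memory.py | _subdivide_long
-- ===== SOURCE A (Python) =====
-- def _fixed_size_split(msgs: list, group_size: int = 20) -> list[list]:
--     """按固定 group_size 切分，余数<5 并入末组（B1 兜底用）"""
--     total = len(msgs)
--     if total <= group_size:
--         return [msgs]
--     full_groups = total // group_size
--     remainder = total % group_size
--     if 0 < remainder < 5:
--         full_groups -= 1
--         groups = [msgs[i * group_size:(i + 1) * group_size] for i in range(full_groups)]
--         groups.append(msgs[full_groups * group_size:])
--     else:
--         groups = [msgs[i * group_size:(i + 1) * group_size] for i in range(full_groups)]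
--         if remainder > 0:
--             groups.append(msgs[full_groups * group_size:])
--     return groups
--
-- def _subdivide_long(seg: list, target_max: int) -> list[list]:
--     """B2: 在段内最大显著 gap 处切分；找不到则降级 B1 硬切。"""
--     if len(seg) <= target_max:
--         return [seg]
--
--     gaps = [seg[i]["created_at"] - seg[i - 1]["created_at"] for i in range(1, len(seg))]
--     max_gap = max(gaps)
--     sorted_gaps = sorted(gaps)
--     median_gap = sorted_gaps[len(sorted_gaps) // 2]
--
--     if max_gap > 60 and max_gap > median_gap * 3:
--         cut_idx = gaps.index(max_gap) + 1
--         left = seg[:cut_idx]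
--         right = seg[cut_idx:]
--         return _subdivide_long(left, target_max) + _subdivide_long(right, target_max)
--
--     return _fixed_size_split(seg, target_max)
-- ===== SOURCE B (Python) =====
-- def _subdivide_long(seg: list, target_max: int) -> list[list]:
--     """Split at the largest significant time gap, recursively; else fall back to fixed chunks.
--
--     One pass finds the max gap and its first position; the per-call full sort
--     for the median is replaced by a counting test: max_gap > 3*median(gaps)
--     iff more than len(gaps)//2 gaps g satisfy 3*g < max_gap."""
--     if len(seg) <= target_max:
--         return [seg]
--
--     times = [m["created_at"] for m in seg]
--     max_gap, cut = _max_gap_and_cut(times)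
--     if max_gap > 60:
--         if _count_far_below(times, max_gap) > (len(times) - 1) // 2:
--             return _subdivide_long(seg[:cut], target_max) + _subdivide_long(seg[cut:], target_max)
--
--     return _chunks_merge_short_tail(seg, target_max)
--
--
-- def _max_gap_and_cut(times: list) -> tuple:
--     """Largest gap between consecutive times and the index of its first occurrence."""
--     max_gap, cut = None, 1
--     for i in range(1, len(times)):
--         g = times[i] - times[i - 1]
--         if max_gap is None or max_gap < g:
--             max_gap, cut = g, i
--     return max_gap, cut
--
--
-- def _count_far_below(times: list, max_gap: int) -> int:
--     """How many consecutive gaps are less than a third of max_gap."""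
--     below = 0
--     for i in range(1, len(times)):
--         if 3 * (times[i] - times[i - 1]) < max_gap:
--             below += 1
--     return below
--
--
-- def _chunks_merge_short_tail(msgs: list, size: int) -> list[list]:
--     """Chunk greedily by `size`; a proper remainder shorter than 5 joins the previous chunk."""
--     if len(msgs) <= size:
--         return [msgs]
--     return _merge_short_tail([msgs[i:i + size] for i in range(0, len(msgs), size)], size)
--
--
-- def _merge_short_tail(groups: list, size: int) -> list[list]:
--     """Pop a short proper tail chunk and extend the previous chunk with it."""
--     tail = groups[-1]
--     if len(groups) > 1 and len(tail) < 5 and len(tail) < size: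
--         groups.pop()
--         groups[-1] = groups[-1] + tail
--     return groups
-- ===== Notes on version B (the rewrite author's own statement) =====
-- stated objective: alternative
-- what changed: The per-call full sort of the gaps (used only to read off the median) is replaced by a single max/first-argmax pass plus a counting test (max_gap > 3*median iff more than len(gaps)//2 gaps are below max_gap/3), and the fixed-size fallback is rebuilt as greedy chunking with a short tail merged into the previous chunk instead of quotient/remainder arithmetic.
-- outside the precondition, e.g. on _subdivide_long([{'created_at': -1}, {'created_at': 59}], -1): A returns [], B raises IndexError
import Mathlib
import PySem

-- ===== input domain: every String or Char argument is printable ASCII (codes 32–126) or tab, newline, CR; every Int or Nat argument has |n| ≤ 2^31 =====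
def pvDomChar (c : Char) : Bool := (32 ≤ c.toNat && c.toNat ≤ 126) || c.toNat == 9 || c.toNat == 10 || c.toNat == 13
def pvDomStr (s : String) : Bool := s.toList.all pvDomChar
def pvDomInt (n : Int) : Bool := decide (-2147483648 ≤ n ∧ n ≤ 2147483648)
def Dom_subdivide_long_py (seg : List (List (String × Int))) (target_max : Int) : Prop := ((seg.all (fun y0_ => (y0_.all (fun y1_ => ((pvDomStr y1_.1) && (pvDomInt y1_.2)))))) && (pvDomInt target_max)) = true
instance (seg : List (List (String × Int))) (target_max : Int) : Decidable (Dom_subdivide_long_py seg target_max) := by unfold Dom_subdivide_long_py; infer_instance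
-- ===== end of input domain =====

-- B (subdivide_long_py_alt) replaces A's per-call sort-for-median by a one-pass max/first-argmax scan
-- plus a counting test, and rebuilds the fixed-size fallback as greedy chunking with a short tail
-- merged into the previous chunk (alternative algorithm, same return value).

-- ===== PORT A =====
-- m["created_at"]: dict lookup; the .getD 0 default is never taken under Pre_ (missing key = Python KeyError)
def pvTime (m : List (String × Int)) : Int :=
  ((PySem.Dict.mk m).get? "created_at").getD 0

-- gaps = [seg[i]["created_at"] - seg[i-1]["created_at"] for i in range(1, len(seg))]
def pvGapsA (seg : List (List (String × Int))) : List Int :=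
  (PySem.List.pyRange 1 (seg.length : Int) 1).map
    (fun i => pvTime (PySem.List.pyGetD seg i []) - pvTime (PySem.List.pyGetD seg (i - 1) []))

def pvFixedSizeSplit (msgs : List (List (String × Int))) (group_size : Int) :
    List (List (List (String × Int))) :=
  if (msgs.length : Int) ≤ group_size then [msgs]
  else
    -- full_groups := len // size, remainder := len % size (inlined)
    if 0 < PySem.Int.mod (msgs.length : Int) group_size ∧
        PySem.Int.mod (msgs.length : Int) group_size < 5 then
      (PySem.List.pyRange 0 (PySem.Int.floordiv (msgs.length : Int) group_size - 1) 1).map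
          (fun i => PySem.List.slice msgs (some (i * group_size)) (some ((i + 1) * group_size)))
        ++ [PySem.List.slice msgs
              (some ((PySem.Int.floordiv (msgs.length : Int) group_size - 1) * group_size)) none]
    else
      if 0 < PySem.Int.mod (msgs.length : Int) group_size then
        (PySem.List.pyRange 0 (PySem.Int.floordiv (msgs.length : Int) group_size) 1).map
            (fun i => PySem.List.slice msgs (some (i * group_size)) (some ((i + 1) * group_size)))
          ++ [PySem.List.slice msgs
                (some (PySem.Int.floordiv (msgs.length : Int) group_size * group_size)) none]
      else
        (PySem.List.pyRange 0 (PySem.Int.floordiv (msgs.length : Int) group_size) 1).map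
            (fun i => PySem.List.slice msgs (some (i * group_size)) (some ((i + 1) * group_size)))

-- termination helper for port A (cited in decreasing_by)
lemma pvIndexMax_bounds {gaps : List Int} {M : Int}
    (h : PySem.List.max? gaps (fun g => g) = some M) :
    (PySem.List.index? gaps M).getD 0 + 1 ≤ gaps.length ∧ 1 ≤ gaps.length := by
  have hm : M ∈ gaps := PySem.List.max?_mem h
  have hs : (PySem.List.index? gaps M).isSome = true :=
    (PySem.List.index?_isSome_iff gaps M).mpr hm
  obtain ⟨k, hk⟩ := Option.isSome_iff_exists.mp hs
  obtain ⟨hlt, -, -⟩ := PySem.List.getElem_of_index?_eq_some hk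
  rw [hk]
  simp only [Option.getD_some]
  omega

def subdivide_long_py (seg : List (List (String × Int))) (target_max : Int) :
    List (List (List (String × Int))) :=
  if (seg.length : Int) ≤ target_max then [seg]
  else
    -- gaps := pvGapsA seg (inlined below so that the termination argument can see it)
    match hmax : PySem.List.max? (pvGapsA seg) (fun g => g) with
    | none => [seg]     -- Python: max([]) raises ValueError here; outside Pre_
    | some max_gap =>
      if 60 < max_gap ∧
          PySem.List.pyGetD (PySem.List.sorted (pvGapsA seg) (fun g => g) false)
              (PySem.Int.floordiv (((PySem.List.sorted (pvGapsA seg) (fun g => g) false).length : Int)) 2) 0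
            * 3 < max_gap then
        subdivide_long_py
            (PySem.List.slice seg none (some (((PySem.List.index? (pvGapsA seg) max_gap).getD 0 + 1 : Nat) : Int))) target_max ++
        subdivide_long_py
            (PySem.List.slice seg (some (((PySem.List.index? (pvGapsA seg) max_gap).getD 0 + 1 : Nat) : Int))) target_max
      else pvFixedSizeSplit seg target_max
termination_by seg.length
decreasing_by
  · obtain ⟨h1, h2⟩ := pvIndexMax_bounds hmax
    have hlen : (pvGapsA seg).length = ((seg.length : Int) - 1).toNat := by
      simp [pvGapsA, PySem.List.length_pyRange_one]
    rw [hlen] at h1 h2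
    rw [PySem.List.slice_to_natCast]
    simp only [List.length_take]
    omega
  · obtain ⟨h1, h2⟩ := pvIndexMax_bounds hmax
    have hlen : (pvGapsA seg).length = ((seg.length : Int) - 1).toNat := by
      simp [pvGapsA, PySem.List.length_pyRange_one]
    rw [hlen] at h1 h2
    rw [PySem.List.slice_from_natCast]
    simp only [List.length_drop]
    omega

-- ===== PORT B =====
def pvGapAt (ts : List Int) (i : Int) : Int :=
  PySem.List.pyGetD ts i 0 - PySem.List.pyGetD ts (i - 1) 0

def pvGaps (ts : List Int) : List Int :=
  (PySem.List.pyRange 1 (ts.length : Int) 1).map (pvGapAt ts)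

-- one step of _max_gap_and_cut's loop
def pvStep (g : Int → Int) (st : Option Int × Int) (i : Int) : Option Int × Int :=
  match st.1 with
  | none => (some (g i), i)
  | some M => if M < g i then (some (g i), i) else st

def pvMaxGapAndCut (ts : List Int) : Option Int × Int :=
  (PySem.List.pyRange 1 (ts.length : Int) 1).foldl (pvStep (pvGapAt ts)) (none, 1)

def pvCountFarBelow (ts : List Int) (max_gap : Int) : Int :=
  (PySem.List.pyRange 1 (ts.length : Int) 1).foldl
    (fun below i => if 3 * pvGapAt ts i < max_gap then below + 1 else below) 0

-- the merge step of _chunks_merge_short_tail: pop the short tail and extend the previous chunk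
def pvMergeTail (groups : List (List (List (String × Int)))) (size : Int) :
    List (List (List (String × Int))) :=
  if 1 < groups.length ∧ ((PySem.List.pyGetD groups (-1) []).length : Int) < 5 ∧
      ((PySem.List.pyGetD groups (-1) []).length : Int) < size then
    groups.dropLast.dropLast ++
      [PySem.List.pyGetD groups.dropLast (-1) [] ++ PySem.List.pyGetD groups (-1) []]
  else groups

def pvChunksMergeShortTail (msgs : List (List (String × Int))) (size : Int) :
    List (List (List (String × Int))) :=
  if (msgs.length : Int) ≤ size then [msgs]
  else
    -- groups := the greedy chunks, tail := groups[-1] (inlined)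
    pvMergeTail
      ((PySem.List.pyRange 0 (msgs.length : Int) size).map
        (fun i => PySem.List.slice msgs (some i) (some (i + size)))) size

-- characterisation of the scan loop (also the termination fact for port B)
lemma pvScan_aux (g : Int → Int) (n : Nat) (hn : 1 ≤ n) :
    ∃ (M : Int) (k : Nat),
      PySem.List.max? ((PySem.List.pyRange 1 (1 + (n : Int)) 1).map g) (fun x => x) = some M ∧
      PySem.List.index? ((PySem.List.pyRange 1 (1 + (n : Int)) 1).map g) M = some k ∧
      k + 1 ≤ n ∧
      (PySem.List.pyRange 1 (1 + (n : Int)) 1).foldl (pvStep g) (none, 1) = (some M, (k : Int) + 1) := by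
  induction n, hn using Nat.le_induction with
  | base =>
    have h1 : (1 + ((1:Nat) : Int)) = 1 + 1 := by norm_num
    rw [h1, PySem.List.pyRange_one_singleton]
    refine ⟨g 1, 0, ?_, ?_, by omega, ?_⟩
    · simp [PySem.List.max?_id_cons]
    · simp
    · simp [pvStep]
  | succ n hn ih =>
    obtain ⟨M, k, hmax, hidx, hk, hfold⟩ := ih
    have hsplit : PySem.List.pyRange 1 (1 + ((n + 1 : Nat) : Int)) 1
        = PySem.List.pyRange 1 (1 + (n : Int)) 1 ++ [1 + (n : Int)] := by
      rw [show (1 + ((n + 1 : Nat) : Int)) = (1 + (n : Int)) + 1 by push_cast; ring]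
      exact PySem.List.pyRange_one_succ_right (by omega)
    rw [hsplit, List.map_append, List.foldl_append, hfold]
    simp only [List.map_cons, List.map_nil]
    set G := (PySem.List.pyRange 1 (1 + (n : Int)) 1).map g with hG
    set v := g (1 + (n : Int)) with hv
    have hGne : G ≠ [] := by
      intro h
      have hnone : PySem.List.max? ([] : List Int) (fun x => x) = none :=
        (PySem.List.max?_eq_none_iff _ _).mpr rfl
      rw [h, hnone] at hmax
      cases hmax
    obtain ⟨h₀, t, hcons⟩ := List.exists_cons_of_ne_nil hGne
    have hMfold : t.foldl max h₀ = M := by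
      have := PySem.List.max?_id_cons h₀ t
      rw [hcons] at hmax
      rw [this] at hmax
      exact Option.some.inj hmax
    have hGlen : G.length = n := by
      rw [hG, List.length_map, PySem.List.length_pyRange_one]
      omega
    have hmax' : ∀ y ∈ G, y ≤ M := fun y hy => PySem.List.max?_isMax hmax y hy
    by_cases hlt : M < v
    · refine ⟨v, n, ?_, ?_, by omega, ?_⟩
      · rw [hcons, List.cons_append, PySem.List.max?_id_cons, List.foldl_concat, hMfold, max_eq_right (le_of_lt hlt)]
      · have hnotmem : v ∉ G := fun hv' => absurd (hmax' v hv') (not_le.mpr hlt)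
        have h := PySem.List.index?_append_singleton_self G v hnotmem
        rw [hGlen] at h
        exact h
      · simp only [List.foldl_cons, List.foldl_nil, pvStep]
        rw [show ((n:Int) + 1) = 1 + (n:Int) by ring, if_pos hlt]
    · refine ⟨M, k, ?_, ?_, by omega, ?_⟩
      · rw [hcons, List.cons_append, PySem.List.max?_id_cons, List.foldl_concat, hMfold, max_eq_left (not_lt.mp hlt)]
      · exact (PySem.List.index?_append_of_mem [v] (PySem.List.max?_mem hmax)).trans hidx
      · simp only [List.foldl_cons, List.foldl_nil, pvStep]
        rw [if_neg hlt]

lemma pvScan_spec (ts : List Int) (h2 : 2 ≤ ts.length) :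
    ∃ (M : Int) (k : Nat),
      PySem.List.max? (pvGaps ts) (fun x => x) = some M ∧
      PySem.List.index? (pvGaps ts) M = some k ∧
      k + 2 ≤ ts.length ∧
      pvMaxGapAndCut ts = (some M, (k : Int) + 1) := by
  have hcast : (ts.length : Int) = 1 + ((ts.length - 1 : Nat) : Int) := by omega
  obtain ⟨M, k, hmax, hidx, hk, hfold⟩ := pvScan_aux (pvGapAt ts) (ts.length - 1) (by omega)
  refine ⟨M, k, ?_, ?_, by omega, ?_⟩
  · rw [pvGaps, hcast]; exact hmax
  · rw [pvGaps, hcast]; exact hidx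
  · rw [pvMaxGapAndCut, hcast]; exact hfold

lemma pvScan_some_bounds {ts : List Int} {M c : Int}
    (h : pvMaxGapAndCut ts = (some M, c)) : 1 ≤ c ∧ c < (ts.length : Int) := by
  by_cases h2 : 2 ≤ ts.length
  · obtain ⟨M', k, -, -, hk, hfold⟩ := pvScan_spec ts h2
    rw [hfold] at h
    have hc : c = (k : Int) + 1 := (Prod.mk.injEq _ _ _ _).mp h |>.2.symm
    constructor <;> omega
  · exfalso
    have hnil : PySem.List.pyRange 1 (ts.length : Int) 1 = [] :=
      PySem.List.pyRange_one_eq_nil (by omega)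
    rw [pvMaxGapAndCut, hnil] at h
    simp at h

def subdivide_long_py_alt (seg : List (List (String × Int))) (target_max : Int) :
    List (List (List (String × Int))) :=
  if (seg.length : Int) ≤ target_max then [seg]
  else
    -- times := seg.map pvTime (inlined below so that the termination argument can see it)
    match hst : pvMaxGapAndCut (seg.map pvTime) with
    | (none, _) => [seg]     -- Python: 'None > 60' raises TypeError here; outside Pre_
    | (some max_gap, cut) =>
      if 60 < max_gap then
        if PySem.Int.floordiv (((seg.map pvTime).length : Int) - 1) 2
            < pvCountFarBelow (seg.map pvTime) max_gap then
          subdivide_long_py_alt (PySem.List.slice seg none (some cut)) target_max ++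
          subdivide_long_py_alt (PySem.List.slice seg (some cut) none) target_max
        else pvChunksMergeShortTail seg target_max
      else pvChunksMergeShortTail seg target_max
termination_by seg.length
decreasing_by
  · obtain ⟨h1, h2⟩ := pvScan_some_bounds hst
    rw [List.length_map] at h2
    rw [PySem.List.slice_to seg (by omega)]
    simp only [List.length_take]
    omega
  · obtain ⟨h1, h2⟩ := pvScan_some_bounds hst
    rw [List.length_map] at h2
    rw [PySem.List.slice_from seg (by omega)]
    simp only [List.length_drop]
    omega

-- ===== PRECONDITION & SPEC =====
-- Pre_ excludes the inputs where Python A raises (target_max ≤ 0 reaching max() on empty gaps or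
-- '//' by zero group size, and a missing "created_at" key when the segment actually gets split), and
-- the negative target_max corner where A's negative floor division makes range() empty so A returns
-- an accidental [] while B's groups[-1] raises IndexError.
def Pre_subdivide_long_py (seg : List (List (String × Int))) (target_max : Int) : Prop :=
  (0 ≤ target_max ∧ (seg.length : Int) ≤ target_max) ∨
  (1 ≤ target_max ∧ ∀ m ∈ seg, ((PySem.Dict.mk m).get? "created_at").isSome = true)
instance (seg : List (List (String × Int))) (target_max : Int) : Decidable (Pre_subdivide_long_py seg target_max) := by unfold Pre_subdivide_long_py; infer_instance

def pvWitness_subdivide_long_py : (List (List (String × Int))) × Int :=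
  ([[("created_at", 0)], [("created_at", 100)]], 1)

def Spec_subdivide_long_py (seg : List (List (String × Int))) (target_max : Int) (out : List (List (List (String × Int)))) : Prop := out = subdivide_long_py_alt seg target_max
instance (seg : List (List (String × Int))) (target_max : Int) (out : List (List (List (String × Int)))) : Decidable (Spec_subdivide_long_py seg target_max out) := by unfold Spec_subdivide_long_py; infer_instance

-- ===== CLAIM (what is proved, stated in full; the proofs are below) =====
def Claim_equal_subdivide_long_py : Prop := ∀ (seg : List (List (String × Int))) (target_max : Int), Dom_subdivide_long_py seg target_max → Pre_subdivide_long_py seg target_max → Spec_subdivide_long_py seg target_max (subdivide_long_py seg target_max)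

-- ===== LEMMAS AND PROOFS =====
lemma pvGapsA_eq (seg : List (List (String × Int))) :
    pvGapsA seg = pvGaps (seg.map pvTime) := by
  unfold pvGapsA pvGaps pvGapAt
  rw [List.length_map]
  refine List.map_congr_left (fun i _ => ?_)
  have h1 := PySem.List.pyGetD_map pvTime seg i []
  have h2 := PySem.List.pyGetD_map pvTime seg (i - 1) []
  have h0 : pvTime [] = 0 := rfl
  rw [h0] at h1 h2
  rw [h1, h2]

-- order statistic of a sorted list via counting
lemma pvSorted_count_iff (s : List Int) (hs : s.Pairwise (· ≤ ·)) (M : Int) :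
    ∀ k, k < s.length →
      (3 * s.getD k 0 < M ↔ k < s.countP (fun g => decide (3 * g < M))) := by
  induction s with
  | nil => intro k hk; simp at hk
  | cons a t ih =>
    have ha : ∀ b ∈ t, a ≤ b := fun b hb => List.rel_of_pairwise_cons hs hb
    have ht := List.Pairwise.of_cons hs
    intro k hk
    by_cases hpa : 3 * a < M
    · cases k with
      | zero =>
        simp only [List.getD_cons_zero, List.countP_cons, hpa]
        simp
      | succ k =>
        simp only [List.getD_cons_succ, List.countP_cons]
        rw [ih ht k (by simpa using hk)]
        simp [hpa]
    · have hzero : t.countP (fun g => decide (3 * g < M)) = 0 := by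
        rw [List.countP_eq_zero]
        intro b hb
        simp only [decide_eq_true_eq]
        intro hpb
        exact hpa (lt_of_le_of_lt (by linarith [ha b hb]) hpb)
      cases k with
      | zero =>
        simp only [List.getD_cons_zero, List.countP_cons, hzero, hpa]
        simp
      | succ k =>
        have hk' : k < t.length := by simpa using hk
        have hmem : t.getD k 0 ∈ t := by
          rw [List.getD_eq_getElem?_getD, List.getElem?_eq_getElem hk']
          exact List.getElem_mem hk'
        constructor
        · intro habs
          rw [List.getD_cons_succ] at habs
          exact absurd (lt_of_le_of_lt (by linarith [ha _ hmem]) habs) hpa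
        · intro habs
          rw [List.countP_cons, hzero] at habs
          simp [hpa] at habs

-- A's median test equals B's counting test
lemma pvMedian_iff (G : List Int) (hne : G ≠ []) (M : Int) :
    (PySem.List.pyGetD (PySem.List.sorted G (fun g => g) false)
        (PySem.Int.floordiv (((PySem.List.sorted G (fun g => g) false).length : Int)) 2) 0) * 3 < M ↔
      (G.length / 2 : Nat) < G.countP (fun g => decide (3 * g < M)) := by
  set s := PySem.List.sorted G (fun g => g) false with hsdef
  have hlen : s.length = G.length := PySem.List.length_sorted G _ _
  have hGpos : 0 < G.length := List.length_pos_of_ne_nil hne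
  have hfd : PySem.Int.floordiv ((s.length : Int)) 2 = ((s.length / 2 : Nat) : Int) := by
    exact_mod_cast PySem.Int.floordiv_natCast s.length 2
  rw [hfd, PySem.List.pyGetD_natCast, hlen]
  have hk : G.length / 2 < s.length := by omega
  have hcount : s.countP (fun g => decide (3 * g < M)) = G.countP (fun g => decide (3 * g < M)) :=
    (PySem.List.sorted_perm G (fun g => g) false).countP_eq _
  have hiff := pvSorted_count_iff s (PySem.List.sorted_pairwise G (fun g => g)) M (G.length / 2) hk
  rw [hcount] at hiff
  rw [show s.getD (G.length / 2) 0 * 3 = 3 * s.getD (G.length / 2) 0 from by ring]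
  exact hiff

lemma pvCountFarBelow_eq (ts : List Int) (M : Int) :
    pvCountFarBelow ts M = ((pvGaps ts).countP (fun g => decide (3 * g < M)) : Int) := by
  unfold pvCountFarBelow pvGaps
  have hfun : (fun (below : Int) i => if 3 * pvGapAt ts i < M then below + 1 else below)
      = (fun (acc : Int) i => if (fun j => decide (3 * pvGapAt ts j < M)) i = true then acc + 1 else acc) := by
    funext below i
    by_cases h : 3 * pvGapAt ts i < M <;> simp [h]
  rw [hfun, PySem.List.foldl_count_if (fun j => decide (3 * pvGapAt ts j < M))]
  rw [List.countP_map]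
  norm_num
  rfl

lemma pvMapChunkA {α : Type} (xs : List α) (f sn : Nat) :
    (PySem.List.pyRange 0 (f : Int) 1).map
        (fun i => PySem.List.slice xs (some (i * (sn : Int))) (some ((i + 1) * (sn : Int))))
      = (List.range f).map (fun k => (xs.drop (k * sn)).take sn) := by
  rw [PySem.List.pyRange_one]
  rw [show ((f : Int) - 0).toNat = f by omega]
  rw [List.map_map]
  refine List.map_congr_left (fun k _ => ?_)
  simp only [Function.comp]
  rw [show ((0 : Int) + (k : Int)) = (k : Int) by ring]
  rw [show ((k : Int) * (sn : Int)) = ((k * sn : Nat) : Int) by push_cast; ring]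
  rw [show (((k : Int)) + 1) * (sn : Int) = ((k * sn : Nat) : Int) + (sn : Int) by push_cast; ring]
  exact PySem.List.slice_natCast_add xs (k * sn) sn

lemma pvMapChunkB {α : Type} (xs : List α) (n sn : Nat) (hsn : 0 < sn) (hn : 0 < n) :
    (PySem.List.pyRange 0 (n : Int) (sn : Int)).map
        (fun i => PySem.List.slice xs (some i) (some (i + (sn : Int))))
      = (List.range ((n + sn - 1) / sn)).map (fun k => (xs.drop (k * sn)).take sn) := by
  rw [PySem.List.pyRange_of_pos 0 (n : Int) (by exact_mod_cast hsn)]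
  rw [if_pos (by exact_mod_cast hn)]
  have hcnt : (((n : Int) - 0 + (sn : Int) - 1) / (sn : Int)).toNat = (n + sn - 1) / sn := by
    rw [show ((n : Int) - 0 + (sn : Int) - 1) = ((n + sn - 1 : Nat) : Int) by omega]
    rw [← Int.natCast_ediv (n + sn - 1) sn]
    exact Int.toNat_natCast _
  rw [hcnt, List.map_map]
  refine List.map_congr_left (fun k _ => ?_)
  simp only [Function.comp]
  rw [show ((0 : Int) + (sn : Int) * (k : Int)) = ((k * sn : Nat) : Int) by push_cast; ring]
  exact PySem.List.slice_natCast_add xs (k * sn) sn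

lemma pvGetLast_map_range {α : Type} (f : Nat → α) (m : Nat)
    (hne : (List.range m).map f ≠ []) :
    ((List.range m).map f).getLast hne = f (m - 1) := by
  have hm : 0 < m := by
    by_contra h
    have : m = 0 := by omega
    subst this; simp at hne
  rw [List.getLast_eq_getElem]
  simp only [List.length_map, List.length_range]
  rw [List.getElem_map, List.getElem_range]

lemma pvTail_map_range {α : Type} (f : Nat → α) (m : Nat) (hm : 0 < m) (d : α) :
    PySem.List.pyGetD ((List.range m).map f) (-1) d = f (m - 1) := by
  have hne : (List.range m).map f ≠ [] := by
    simp only [ne_eq, List.map_eq_nil_iff, List.range_eq_nil]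
    omega
  rw [PySem.List.pyGetD_neg_one _ _ hne, pvGetLast_map_range]

lemma pvDropLast_map_range {α : Type} (f : Nat → α) (m : Nat) :
    ((List.range m).map f).dropLast = (List.range (m - 1)).map f := by
  cases m with
  | zero => simp
  | succ m =>
    rw [List.range_succ, List.map_append, List.map_singleton, List.dropLast_concat]
    simp

lemma pvChunks_eq (msgs : List (List (String × Int))) (s : Int) (hs : 1 ≤ s) :
    pvFixedSizeSplit msgs s = pvChunksMergeShortTail msgs s := by
  obtain ⟨sn, rfl⟩ : ∃ sn : Nat, s = (sn : Int) := ⟨s.toNat, by omega⟩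
  have hsn : 1 ≤ sn := by exact_mod_cast hs
  unfold pvFixedSizeSplit pvChunksMergeShortTail
  by_cases hle : (msgs.length : Int) ≤ (sn : Int)
  · rw [if_pos hle, if_pos hle]
  · rw [if_neg hle, if_neg hle]
    set n := msgs.length with hn
    have hlt : sn < n := by exact_mod_cast not_le.mp hle
    set q := n / sn with hq
    set r := n % sn with hr
    have hq1 : 1 ≤ q := (Nat.one_le_div_iff (by omega)).mpr (by omega)
    have hrlt : r < sn := Nat.mod_lt _ (by omega)
    have hnqr : sn * q + r = n := Nat.div_add_mod n sn
    have hfd : PySem.Int.floordiv (n : Int) (sn : Int) = (q : Int) := by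
      exact_mod_cast PySem.Int.floordiv_natCast n sn
    have hmod : PySem.Int.mod (n : Int) (sn : Int) = (r : Int) := by
      exact_mod_cast PySem.Int.mod_natCast n sn
    have hm : (n + sn - 1) / sn = if r = 0 then q else q + 1 := by
      have h1 : n + sn - 1 = sn * q + (r + sn - 1) := by omega
      rw [h1, Nat.mul_add_div (by omega)]
      by_cases hr0 : r = 0
      · rw [if_pos hr0, hr0, Nat.div_eq_of_lt (by omega)]
        omega
      · rw [if_neg hr0]
        have : (r + sn - 1) / sn = 1 := by
          apply Nat.div_eq_of_lt_le <;> omega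
        omega
    have hnqr' : q * sn + r = n := by rw [Nat.mul_comm]; exact hnqr
    have hB := pvMapChunkB msgs n sn (by omega) (by omega)
    have hlenC : ∀ k, ((msgs.drop (k * sn)).take sn).length = min sn (n - k * sn) := by
      intro k
      simp only [List.length_take, List.length_drop]
      omega
    rw [hfd, hmod, hB, hm]
    by_cases hr0 : r = 0
    · -- exact division: no merge, no extra tail group
      rw [if_pos hr0]
      rw [if_neg (by simp [hr0]), if_neg (by simp [hr0])]
      rw [pvMapChunkA msgs q sn]
      rw [pvMergeTail]
      rw [if_neg ?_]
      rintro ⟨-, -, h3⟩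
      rw [pvTail_map_range _ q (by omega)] at h3
      rw [hlenC (q - 1)] at h3
      have he : q * sn - sn + sn = q * sn := by
        have : sn ≤ q * sn := Nat.le_mul_of_pos_left sn (by omega)
        omega
      rw [show (q - 1) * sn = q * sn - sn by rw [Nat.sub_one_mul], show n = q * sn by omega] at h3
      omega
    · by_cases hr5 : r < 5
      · -- short remainder: A merges it into the last full chunk, B pops and extends
        rw [if_pos (by constructor <;> [exact_mod_cast Nat.pos_of_ne_zero hr0; exact_mod_cast hr5])]
        rw [if_neg hr0]
        rw [show ((q : Int) - 1) = ((q - 1 : Nat) : Int) by omega]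
        rw [pvMapChunkA msgs (q - 1) sn]
        rw [show ((q - 1 : Nat) : Int) * (sn : Int) = (((q - 1) * sn : Nat) : Int) by push_cast; ring]
        rw [PySem.List.slice_from_natCast]
        rw [pvMergeTail]
        have hglen : (((List.range (q + 1)).map
            (fun k => (msgs.drop (k * sn)).take sn)).length) = q + 1 := by simp
        rw [if_pos ?_]
        · rw [pvTail_map_range _ (q + 1) (by omega)]
          simp only [Nat.add_sub_cancel]
          rw [pvDropLast_map_range]
          simp only [Nat.add_sub_cancel]
          rw [pvTail_map_range _ q (by omega)]
          rw [pvDropLast_map_range]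
          congr 1
          congr 1
          have hCq : (msgs.drop (q * sn)).take sn = msgs.drop (q * sn) := by
            apply List.take_of_length_le
            simp only [List.length_drop]
            omega
          rw [hCq]
          have hdd : msgs.drop (q * sn) = (msgs.drop ((q - 1) * sn)).drop sn := by
            rw [List.drop_drop]
            congr 1
            rw [Nat.sub_one_mul]
            have : sn ≤ q * sn := Nat.le_mul_of_pos_left sn (by omega)
            omega
          rw [hdd, List.take_append_drop]
        · refine ⟨by rw [hglen]; omega, ?_, ?_⟩
          · rw [pvTail_map_range _ (q + 1) (by omega)]
            simp only [Nat.add_sub_cancel]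
            rw [hlenC q]
            have : min sn (n - q * sn) = r := by omega
            rw [this]
            omega
          · rw [pvTail_map_range _ (q + 1) (by omega)]
            simp only [Nat.add_sub_cancel]
            rw [hlenC q]
            have : min sn (n - q * sn) = r := by omega
            rw [this]
            omega
      · -- long remainder: a separate tail group, nothing merged
        rw [if_neg (by rintro ⟨-, h2⟩; exact hr5 (by exact_mod_cast h2))]
        rw [if_pos (by exact_mod_cast Nat.pos_of_ne_zero hr0)]
        rw [if_neg hr0]
        rw [pvMapChunkA msgs q sn]
        rw [show (q : Int) * (sn : Int) = ((q * sn : Nat) : Int) by push_cast; ring]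
        rw [PySem.List.slice_from_natCast]
        rw [pvMergeTail]
        rw [if_neg ?_]
        · rw [List.range_succ, List.map_append, List.map_singleton]
          congr 1
          congr 1
          apply (List.take_of_length_le ?_).symm
          simp only [List.length_drop]
          omega
        · rintro ⟨-, h2, -⟩
          rw [pvTail_map_range _ (q + 1) (by omega)] at h2
          simp only [Nat.add_sub_cancel] at h2
          rw [hlenC q] at h2
          have : min sn (n - q * sn) = r := by omega
          rw [this] at h2
          omega

lemma pvAlt_eq (seg : List (List (String × Int))) (target_max : Int)
    (hle : ¬ ((seg.length : Int) ≤ target_max)) {M c : Int}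
    (hscan : pvMaxGapAndCut (seg.map pvTime) = (some M, c)) :
    subdivide_long_py_alt seg target_max =
      if 60 < M then
        if PySem.Int.floordiv (((seg.map pvTime).length : Int) - 1) 2
            < pvCountFarBelow (seg.map pvTime) M then
          subdivide_long_py_alt (PySem.List.slice seg none (some c)) target_max ++
          subdivide_long_py_alt (PySem.List.slice seg (some c) none) target_max
        else pvChunksMergeShortTail seg target_max
      else pvChunksMergeShortTail seg target_max := by
  rw [subdivide_long_py_alt, if_neg hle]
  split
  case _ x heq =>
    rw [hscan] at heq
    cases heq
  case _ mg cut heq =>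
    rw [hscan] at heq
    have hmg : mg = M := (Option.some.inj (congrArg Prod.fst heq)).symm
    have hcut : cut = c := (congrArg Prod.snd heq).symm
    subst hmg
    subst hcut
    rfl

theorem pvMain (seg : List (List (String × Int))) (target_max : Int) (h : 1 ≤ target_max) :
    subdivide_long_py seg target_max = subdivide_long_py_alt seg target_max := by
  by_cases hle : (seg.length : Int) ≤ target_max
  · rw [subdivide_long_py, subdivide_long_py_alt, if_pos hle, if_pos hle]
  · have hlen2 : 2 ≤ seg.length := by omega
    obtain ⟨M, k, hmax, hidx, hk, hscan⟩ :=
      pvScan_spec (seg.map pvTime) (by rw [List.length_map]; omega)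
    have hgap : pvGapsA seg = pvGaps (seg.map pvTime) := pvGapsA_eq seg
    have hmaxA : PySem.List.max? (pvGapsA seg) (fun g => g) = some M := by rw [hgap]; exact hmax
    have hidxA : PySem.List.index? (pvGapsA seg) M = some k := by rw [hgap]; exact hidx
    rw [pvAlt_eq seg target_max hle hscan, subdivide_long_py, if_neg hle]
    split
    case _ heqA =>
      rw [hmaxA] at heqA
      cases heqA
    case _ max_gap heqA =>
      have hMg : max_gap = M := Option.some.inj (heqA.symm.trans hmaxA)
      subst hMg
      -- the median test of A agrees with the counting test of B
      have hGlen : (pvGaps (seg.map pvTime)).length = seg.length - 1 := by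
        rw [pvGaps, List.length_map, PySem.List.length_pyRange_one, List.length_map]
        omega
      have hGne : pvGaps (seg.map pvTime) ≠ [] := by
        intro hnil
        rw [hnil] at hGlen
        simp at hGlen
        omega
      have hmed := pvMedian_iff (pvGaps (seg.map pvTime)) hGne max_gap
      have hcond : (PySem.List.pyGetD (PySem.List.sorted (pvGapsA seg) (fun g => g) false)
            (PySem.Int.floordiv (((PySem.List.sorted (pvGapsA seg) (fun g => g) false).length : Int)) 2) 0
              * 3 < max_gap)
          ↔ (PySem.Int.floordiv (((seg.map pvTime).length : Int) - 1) 2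
              < pvCountFarBelow (seg.map pvTime) max_gap) := by
        rw [hgap, hmed, pvCountFarBelow_eq, List.length_map]
        rw [show ((seg.length : Int) - 1) = ((seg.length - 1 : Nat) : Int) by omega]
        rw [show PySem.Int.floordiv ((seg.length - 1 : Nat) : Int) 2
            = (((seg.length - 1) / 2 : Nat) : Int) from
          by exact_mod_cast PySem.Int.floordiv_natCast (seg.length - 1) 2]
        rw [hGlen]
        constructor
        · intro hlt
          exact_mod_cast hlt
        · intro hlt
          exact_mod_cast hlt
      by_cases h60 : 60 < max_gap
      · by_cases hmc : PySem.Int.floordiv (((seg.map pvTime).length : Int) - 1) 2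
            < pvCountFarBelow (seg.map pvTime) max_gap
        · rw [if_pos ⟨h60, hcond.mpr hmc⟩, if_pos h60, if_pos hmc]
          rw [hidxA]
          simp only [Option.getD_some]
          rw [show (((k + 1 : Nat)) : Int) = (k : Int) + 1 by push_cast; ring]
          rw [pvMain (PySem.List.slice seg none (some ((k : Int) + 1))) target_max h,
            pvMain (PySem.List.slice seg (some ((k : Int) + 1)) none) target_max h]
        · rw [if_neg (fun hc => hmc (hcond.mp hc.2)), if_pos h60, if_neg hmc]
          exact pvChunks_eq seg target_max h
      · rw [if_neg (fun hc => h60 hc.1), if_neg h60]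
        exact pvChunks_eq seg target_max h
termination_by seg.length
decreasing_by
  · rw [List.length_map] at hk
    rw [PySem.List.slice_to seg (by omega : (0:Int) ≤ (k : Int) + 1)]
    simp only [List.length_take]
    omega
  · rw [List.length_map] at hk
    rw [PySem.List.slice_from seg (by omega : (0:Int) ≤ (k : Int) + 1)]
    simp only [List.length_drop]
    omega

-- ===== VERDICT (by name: the statement is the Claim_ definition above) =====
theorem subdivide_long_py_spec : Claim_equal_subdivide_long_py := by
  intro seg target_max _ hpre
  unfold Spec_subdivide_long_py
  rcases hpre with ⟨h0, hle⟩ | ⟨h1, -⟩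
  · rw [subdivide_long_py, subdivide_long_py_alt, if_pos hle, if_pos hle]
  · exact pvMain seg target_max h1
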